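-- pv_equiv track=rewrite | github.com/MauriceCalvert/andante | builder/figuration/selector.py | compute_interval_with_direction
-- ===== SOURCE A (Python) =====
-- def compute_interval_with_direction(
--     degree_a: int,
--     degree_b: int,
--     direction: str | None,
-- ) -> str:
--     """Compute interval name using explicit direction.
--
--     When schema specifies direction (up/down/same), use it to resolve
--     ambiguity in degree-only computation. E.g., degree 1->7 with direction
--     'down' is step_down, not sixth_up.
--
--     Args:
--         degree_a: Starting degree (1-7)
--         degree_b: Ending degree (1-7)
--         direction: Explicit direction (up/down/same) or None
--
--     Returns:
--         Interval name like "step_up", "third_down", etc.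
--     """
--     if direction == "same" or degree_a == degree_b:
--         return "unison"
--     diff = degree_b - degree_a
--     # Adjust diff to match explicit direction
--     if direction == "down" and diff > 0:
--         diff = diff - 7
--     elif direction == "up" and diff < 0:
--         diff = diff + 7
--     # Handle remaining octave wrapping for None direction
--     while diff > 7:
--         diff -= 7
--     while diff < -7:
--         diff += 7
--     if diff == 0:
--         return "unison"
--     elif diff == 1:
--         return "step_up"
--     elif diff == -1:
--         return "step_down"
--     elif diff == 2:
--         return "third_up"
--     elif diff == -2:
--         return "third_down"
--     elif diff == 3:
--         return "fourth_up"
--     elif diff == -3: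
--         return "fourth_down"
--     elif diff == 4:
--         return "fifth_up"
--     elif diff == -4:
--         return "fifth_down"
--     elif diff == 5:
--         return "sixth_up"
--     elif diff == -5:
--         return "sixth_down"
--     elif diff in (6, 7):
--         return "octave_up"
--     elif diff in (-6, -7):
--         return "octave_down"
--     else:
--         assert False, f"Unexpected interval diff: {diff}"
-- ===== SOURCE B (Python) =====
-- def compute_interval_with_direction(
--     degree_a: int,
--     degree_b: int,
--     direction: str | None,
-- ) -> str:
--     if direction == "same" or degree_a == degree_b:
--         return "unison"
--     diff = degree_b - degree_a
--     if direction == "down" and diff > 0: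
--         diff = diff - 7
--     elif direction == "up" and diff < 0:
--         diff = diff + 7
--     # closed-form octave normalisation into [-7, 7] (replaces the while loops)
--     if diff > 7:
--         diff = (diff - 1) % 7 + 1
--     elif diff < -7:
--         diff = -((-diff - 1) % 7 + 1)
--     if diff == 0:
--         return "unison"
--     names = {1: "step", 2: "third", 3: "fourth", 4: "fifth", 5: "sixth", 6: "octave", 7: "octave"}
--     return names[abs(diff)] + ("_up" if diff > 0 else "_down")
-- ===== Notes on version B (the rewrite author's own statement) =====
-- stated objective: simpler
-- what changed: Replaces the two while loops with a closed-form modular reduction into [-7,7] and the 13-branch if/elif chain with a magnitude/sign decomposition: a 7-entry magnitude table plus an '_up'/'_down' suffix chosen by the sign.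
import Mathlib
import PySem

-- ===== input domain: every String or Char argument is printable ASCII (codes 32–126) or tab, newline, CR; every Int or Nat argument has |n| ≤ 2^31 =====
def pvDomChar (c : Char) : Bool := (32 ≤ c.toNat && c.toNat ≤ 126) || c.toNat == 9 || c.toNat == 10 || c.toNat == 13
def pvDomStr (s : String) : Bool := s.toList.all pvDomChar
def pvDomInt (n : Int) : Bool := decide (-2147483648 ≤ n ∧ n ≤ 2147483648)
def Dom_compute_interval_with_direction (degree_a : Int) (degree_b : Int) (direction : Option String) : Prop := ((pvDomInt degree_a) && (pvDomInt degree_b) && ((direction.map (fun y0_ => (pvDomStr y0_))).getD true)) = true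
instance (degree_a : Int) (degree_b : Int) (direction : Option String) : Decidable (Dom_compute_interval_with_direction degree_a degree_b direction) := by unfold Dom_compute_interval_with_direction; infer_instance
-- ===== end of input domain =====

-- B replaces A's two while loops by a closed-form modular reduction into [-7,7]
-- and the 13-branch if/elif chain by a magnitude table plus an '_up'/'_down' suffix (objective: simpler).


-- ===== PORT A =====
-- while diff > 7: diff -= 7
def pvWhileDown (diff : Int) : Int :=
  if h : diff > 7 then pvWhileDown (diff - 7) else diff
termination_by diff.toNat
decreasing_by omega

-- while diff < -7: diff += 7
def pvWhileUp (diff : Int) : Int :=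
  if h : diff < -7 then pvWhileUp (diff + 7) else diff
termination_by (-diff).toNat
decreasing_by omega

def compute_interval_with_direction (degree_a : Int) (degree_b : Int) (direction : Option String) : String :=
  if direction == some "same" || degree_a == degree_b then "unison"
  else
    let diff := degree_b - degree_a
    let diff := if direction == some "down" && decide (diff > 0) then diff - 7
                else if direction == some "up" && decide (diff < 0) then diff + 7
                else diff
    let diff := pvWhileUp (pvWhileDown diff)
    if diff = 0 then "unison"
    else if diff = 1 then "step_up"
    else if diff = -1 then "step_down"
    else if diff = 2 then "third_up"
    else if diff = -2 then "third_down"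
    else if diff = 3 then "fourth_up"
    else if diff = -3 then "fourth_down"
    else if diff = 4 then "fifth_up"
    else if diff = -4 then "fifth_down"
    else if diff = 5 then "sixth_up"
    else if diff = -5 then "sixth_down"
    else if diff = 6 ∨ diff = 7 then "octave_up"
    else if diff = -6 ∨ diff = -7 then "octave_down"
    else ""  -- unreachable: after the two while loops diff ∈ [-7,7] (the Python asserts False here)

-- ===== PORT B =====
def pvNames : PySem.Dict Int String :=
  (((((((PySem.Dict.empty.insert 1 "step").insert 2 "third").insert 3 "fourth").insert 4 "fifth").insert 5 "sixth").insert 6 "octave").insert 7 "octave")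

def compute_interval_with_direction_alt (degree_a : Int) (degree_b : Int) (direction : Option String) : String :=
  if direction == some "same" || degree_a == degree_b then "unison"
  else
    let diff := degree_b - degree_a
    let diff := if direction == some "down" && decide (diff > 0) then diff - 7
                else if direction == some "up" && decide (diff < 0) then diff + 7
                else diff
    let diff := if diff > 7 then PySem.Int.mod (diff - 1) 7 + 1
                else if diff < -7 then -(PySem.Int.mod (-diff - 1) 7 + 1)
                else diff
    if diff = 0 then "unison"
    else (pvNames.getD diff.natAbs "") ++ (if diff > 0 then "_up" else "_down")

-- ===== PRECONDITION & SPEC =====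
def Spec_compute_interval_with_direction (degree_a : Int) (degree_b : Int) (direction : Option String) (out : String) : Prop := out = compute_interval_with_direction_alt degree_a degree_b direction
instance (degree_a : Int) (degree_b : Int) (direction : Option String) (out : String) : Decidable (Spec_compute_interval_with_direction degree_a degree_b direction out) := by unfold Spec_compute_interval_with_direction; infer_instance

-- ===== CLAIM (what is proved, stated in full; the proofs are below) =====
def Claim_equal_compute_interval_with_direction : Prop := ∀ (degree_a : Int) (degree_b : Int) (direction : Option String), Dom_compute_interval_with_direction degree_a degree_b direction → Spec_compute_interval_with_direction degree_a degree_b direction (compute_interval_with_direction degree_a degree_b direction)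

-- ===== LEMMAS AND PROOFS =====
theorem pvWhileDown_closed (d : Int) : pvWhileDown d = if d > 7 then (d - 1) % 7 + 1 else d := by
  induction d using pvWhileDown.induct with
  | case1 d h ih =>
    rw [pvWhileDown, dif_pos h, ih]
    split_ifs <;> omega
  | case2 d h =>
    rw [pvWhileDown, dif_neg h, if_neg h]

theorem pvWhileUp_closed (d : Int) (hd : d ≤ 7) : pvWhileUp d = if d < -7 then -((-d - 1) % 7 + 1) else d := by
  induction d using pvWhileUp.induct with
  | case1 d h ih =>
    rw [pvWhileUp, dif_pos h, ih (by omega)]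
    split_ifs <;> omega
  | case2 d h =>
    rw [pvWhileUp, dif_neg h, if_neg h]

-- combined: the two while loops equal B's closed-form reduction
theorem pv_norm_eq (d : Int) :
    pvWhileUp (pvWhileDown d) =
      (if d > 7 then PySem.Int.mod (d - 1) 7 + 1
       else if d < -7 then -(PySem.Int.mod (-d - 1) 7 + 1)
       else d) := by
  have h1 := pvWhileDown_closed d
  have hmod : ∀ x : Int, PySem.Int.mod x 7 = x % 7 := fun x =>
    PySem.Int.mod_eq_emod_of_pos (by norm_num)
  by_cases h : d > 7
  · have hle : (d - 1) % 7 + 1 ≤ 7 := by omega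
    rw [h1, if_pos h, pvWhileUp_closed _ hle]
    simp only [hmod]
    split_ifs <;> omega
  · rw [h1, if_neg h, pvWhileUp_closed _ (by omega)]
    simp only [hmod]
    split_ifs <;> omega

-- the if/elif chain agrees with the magnitude/sign decomposition on [-7,7] \ {0}
theorem pv_chain_eq (d : Int) (hlo : -7 ≤ d) (hhi : d ≤ 7) (hne : d ≠ 0) :
    (if d = 1 then "step_up"
     else if d = -1 then "step_down"
     else if d = 2 then "third_up"
     else if d = -2 then "third_down"
     else if d = 3 then "fourth_up"
     else if d = -3 then "fourth_down"
     else if d = 4 then "fifth_up"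
     else if d = -4 then "fifth_down"
     else if d = 5 then "sixth_up"
     else if d = -5 then "sixth_down"
     else if d = 6 ∨ d = 7 then "octave_up"
     else if d = -6 ∨ d = -7 then "octave_down"
     else "") = (pvNames.getD d.natAbs "") ++ (if d > 0 then "_up" else "_down") := by
  interval_cases d <;> simp_all <;> rfl

-- ===== VERDICT (by name: the statement is the Claim_ definition above) =====
theorem compute_interval_with_direction_spec : Claim_equal_compute_interval_with_direction := by
  intro a b dir _
  unfold Spec_compute_interval_with_direction compute_interval_with_direction compute_interval_with_direction_alt
  by_cases h0 : (dir == some "same" || a == b) = true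
  · simp [h0]
  · simp only [h0]
    set d1 := (if dir == some "down" && decide (b - a > 0) then b - a - 7
               else if dir == some "up" && decide (b - a < 0) then b - a + 7
               else b - a) with hd1
    rw [pv_norm_eq]
    set d2 := (if d1 > 7 then PySem.Int.mod (d1 - 1) 7 + 1
               else if d1 < -7 then -(PySem.Int.mod (-d1 - 1) 7 + 1)
               else d1) with hd2
    have hmod : ∀ x : Int, PySem.Int.mod x 7 = x % 7 := fun x =>
      PySem.Int.mod_eq_emod_of_pos (by norm_num)
    have hbnd : -7 ≤ d2 ∧ d2 ≤ 7 := by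
      rw [hd2]; simp only [hmod]; split_ifs <;> omega
    by_cases hz : d2 = 0
    · simp [hz]
    · rw [if_neg hz, if_neg hz]
      exact pv_chain_eq d2 hbnd.1 hbnd.2 hz
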